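-- pv_equiv track=rewrite | github.com/aae121/structured-asic-dd2 | visualize_placement.py | calculate_hpwl
-- ===== SOURCE A (Python) =====
-- def calculate_hpwl(nets, placements):
--     """Calculate HPWL for all nets"""
--     net_hpwls = []
--     for net_name, members in nets.items():
--         xs = []
--         ys = []
--         for m in members:
--             if isinstance(m, str) and m in placements:
--                 sx, sy = placements[m]["site"]
--                 xs.append(sx)
--                 ys.append(sy)
--         if xs:
--             hpwl = (max(xs) - min(xs)) + (max(ys) - min(ys))
--             net_hpwls.append(hpwl)
--     return net_hpwls
-- ===== SOURCE B (Python) =====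
-- def calculate_hpwl(nets, placements):
--     """Calculate HPWL for all nets (one-pass bounding-box fold per net)."""
--     net_hpwls = []
--     for members in nets.values():
--         box = None  # (lo_x, hi_x, lo_y, hi_y) of the placed members seen so far
--         for m in members:
--             entry = placements.get(m) if isinstance(m, str) else None
--             if entry is None:
--                 continue
--             x, y = entry["site"]
--             if box is None:
--                 box = (x, x, y, y)
--             else:
--                 lo_x, hi_x, lo_y, hi_y = box
--                 box = (min(lo_x, x), max(hi_x, x), min(lo_y, y), max(hi_y, y))
--         if box is not None:
--             lo_x, hi_x, lo_y, hi_y = box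
--             net_hpwls.append((hi_x - lo_x) + (hi_y - lo_y))
--     return net_hpwls
-- ===== Notes on version B (the rewrite author's own statement) =====
-- stated objective: alternative
-- what changed: Replaced the per-net xs/ys list accumulation plus four max/min reduction passes by a single fold that threads an Option bounding box (lo_x, hi_x, lo_y, hi_y), seeded on the first placed member and updated in place; no intermediate lists are built.
import Mathlib
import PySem

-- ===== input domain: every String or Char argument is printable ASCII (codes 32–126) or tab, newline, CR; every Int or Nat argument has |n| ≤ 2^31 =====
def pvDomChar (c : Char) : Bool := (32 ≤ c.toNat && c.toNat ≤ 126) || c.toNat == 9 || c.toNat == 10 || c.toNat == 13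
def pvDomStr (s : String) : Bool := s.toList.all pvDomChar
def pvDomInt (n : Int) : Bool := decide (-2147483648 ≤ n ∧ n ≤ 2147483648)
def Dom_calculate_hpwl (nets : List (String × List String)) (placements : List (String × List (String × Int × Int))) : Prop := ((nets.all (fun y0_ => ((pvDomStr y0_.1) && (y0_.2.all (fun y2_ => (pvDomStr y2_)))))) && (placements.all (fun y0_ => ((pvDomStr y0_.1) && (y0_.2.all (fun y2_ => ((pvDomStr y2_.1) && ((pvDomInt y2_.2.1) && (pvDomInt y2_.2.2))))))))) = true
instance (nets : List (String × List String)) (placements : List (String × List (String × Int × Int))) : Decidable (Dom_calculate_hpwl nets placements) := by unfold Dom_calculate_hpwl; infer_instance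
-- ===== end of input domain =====

-- B replaces A's per-net xs/ys lists and four max/min passes by a single fold over an
-- Option bounding box; equivalence of return values is proved on inputs where A returns.

-- ===== PORT A =====
-- shared dict-lookup helper: Python 'd[k]' / 'k in d' on an association list (first match)
def pvLookup {ν : Type} (l : List (String × ν)) (k : String) : Option ν :=
  (PySem.Dict.mk l).get? k

def calculate_hpwl (nets : List (String × List String)) (placements : List (String × List (String × Int × Int))) : List Int :=
  nets.foldl (fun net_hpwls net =>
    let p := net.2.foldl (fun (p : List Int × List Int) m =>
      match pvLookup placements m with
      | some d =>
        -- placements[m]["site"]: under Pre_ the "site" key is present; default never used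
        let s := (pvLookup d "site").getD (0, 0)
        (p.1 ++ [s.1], p.2 ++ [s.2])
      | none => p) ([], [])
    if p.1 ≠ [] then
      net_hpwls ++ [((PySem.List.max? p.1 (fun v => v)).getD 0 - (PySem.List.min? p.1 (fun v => v)).getD 0)
                    + ((PySem.List.max? p.2 (fun v => v)).getD 0 - (PySem.List.min? p.2 (fun v => v)).getD 0)]
    else net_hpwls) []

-- ===== PORT B =====
def calculate_hpwl_alt (nets : List (String × List String)) (placements : List (String × List (String × Int × Int))) : List Int :=
  nets.foldl (fun net_hpwls net =>
    let box := net.2.foldl (fun (box : Option (Int × Int × Int × Int)) m =>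
      match pvLookup placements m with
      | none => box
      | some entry =>
        let s := (pvLookup entry "site").getD (0, 0)
        match box with
        | none => some (s.1, s.1, s.2, s.2)
        | some (lox, hix, loy, hiy) => some (min lox s.1, max hix s.1, min loy s.2, max hiy s.2)) none
    match box with
    | none => net_hpwls
    | some (lox, hix, loy, hiy) => net_hpwls ++ [(hix - lox) + (hiy - loy)]) []

-- ===== PRECONDITION & SPEC =====
-- Pre_ excludes exactly the inputs where Python A raises KeyError: a net member that is a key of
-- placements whose inner dict has no "site" key.
def Pre_calculate_hpwl (nets : List (String × List String)) (placements : List (String × List (String × Int × Int))) : Prop :=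
  ∀ net ∈ nets, ∀ m ∈ net.2, ((pvLookup placements m).all (fun d => (pvLookup d "site").isSome)) = true
instance (nets : List (String × List String)) (placements : List (String × List (String × Int × Int))) : Decidable (Pre_calculate_hpwl nets placements) := by unfold Pre_calculate_hpwl; infer_instance
def pvWitness_calculate_hpwl : (List (String × List String)) × (List (String × List (String × Int × Int))) :=
  ([("n1", ["a", "b", "c"]), ("n2", [])], [("a", [("site", 0, 0)]), ("b", [("site", 3, 4)])])

def Spec_calculate_hpwl (nets : List (String × List String)) (placements : List (String × List (String × Int × Int))) (out : List Int) : Prop := out = calculate_hpwl_alt nets placements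
instance (nets : List (String × List String)) (placements : List (String × List (String × Int × Int))) (out : List Int) : Decidable (Spec_calculate_hpwl nets placements out) := by unfold Spec_calculate_hpwl; infer_instance

-- ===== CLAIM (what is proved, stated in full; the proofs are below) =====
def Claim_equal_calculate_hpwl : Prop := ∀ (nets : List (String × List String)) (placements : List (String × List (String × Int × Int))), Dom_calculate_hpwl nets placements → Pre_calculate_hpwl nets placements → Spec_calculate_hpwl nets placements (calculate_hpwl nets placements)

-- ===== LEMMAS AND PROOFS =====

-- the point contributed by member m (none if m is not placed)
def pvPt (placements : List (String × List (String × Int × Int))) (m : String) : Option (Int × Int) :=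
  (pvLookup placements m).map (fun d => (pvLookup d "site").getD (0, 0))

-- A's inner loop builds the x- and y-lists of the placed members
theorem pvA_inner (placements : List (String × List (String × Int × Int))) (members : List String)
    (acc : List Int × List Int) :
    members.foldl (fun (p : List Int × List Int) m =>
      match pvLookup placements m with
      | some d =>
        let s := (pvLookup d "site").getD (0, 0)
        (p.1 ++ [s.1], p.2 ++ [s.2])
      | none => p) acc
    = (acc.1 ++ (members.filterMap (pvPt placements)).map Prod.fst,
       acc.2 ++ (members.filterMap (pvPt placements)).map Prod.snd) := by
  induction members generalizing acc with
  | nil => simp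
  | cons m t ih =>
    simp only [List.foldl_cons, List.filterMap_cons, pvPt]
    cases h : pvLookup placements m with
    | none => simp [pvPt, ih]
    | some d => simp [pvPt, ih]

-- B's fold step, as a function of the contributed point
def pvStep (box : Option (Int × Int × Int × Int)) (s : Int × Int) : Option (Int × Int × Int × Int) :=
  match box with
  | none => some (s.1, s.1, s.2, s.2)
  | some (lox, hix, loy, hiy) => some (min lox s.1, max hix s.1, min loy s.2, max hiy s.2)

theorem pvB_inner (placements : List (String × List (String × Int × Int))) (members : List String)
    (box : Option (Int × Int × Int × Int)) :
    members.foldl (fun box m =>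
      match pvLookup placements m with
      | none => box
      | some entry =>
        let s := (pvLookup entry "site").getD (0, 0)
        match box with
        | none => some (s.1, s.1, s.2, s.2)
        | some (lox, hix, loy, hiy) => some (min lox s.1, max hix s.1, min loy s.2, max hiy s.2)) box
    = (members.filterMap (pvPt placements)).foldl pvStep box := by
  induction members generalizing box with
  | nil => simp
  | cons m t ih =>
    simp only [List.foldl_cons, List.filterMap_cons, pvPt]
    cases h : pvLookup placements m with
    | none => simp [pvPt, ih]
    | some d =>
      simp only [pvPt, Option.map_some, List.foldl_cons, ih]
      rfl

theorem pvStep_foldl_some (t : List (Int × Int)) :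
    ∀ a b c d, t.foldl pvStep (some (a, b, c, d))
      = some ((t.map Prod.fst).foldl min a, (t.map Prod.fst).foldl max b,
              (t.map Prod.snd).foldl min c, (t.map Prod.snd).foldl max d) := by
  induction t with
  | nil => intro a b c d; simp
  | cons s t ih => intro a b c d; simpa [pvStep] using ih _ _ _ _

-- equality of the two per-net loop bodies
theorem pv_step_eq (placements : List (String × List (String × Int × Int)))
    (net : String × List String) (acc : List Int) :
    (let p := net.2.foldl (fun (p : List Int × List Int) m =>
        match pvLookup placements m with
        | some d =>
          let s := (pvLookup d "site").getD (0, 0)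
          (p.1 ++ [s.1], p.2 ++ [s.2])
        | none => p) ([], [])
      if p.1 ≠ [] then
        acc ++ [((PySem.List.max? p.1 (fun v => v)).getD 0 - (PySem.List.min? p.1 (fun v => v)).getD 0)
                + ((PySem.List.max? p.2 (fun v => v)).getD 0 - (PySem.List.min? p.2 (fun v => v)).getD 0)]
      else acc)
    = (let box := net.2.foldl (fun box m =>
        match pvLookup placements m with
        | none => box
        | some entry =>
          let s := (pvLookup entry "site").getD (0, 0)
          match box with
          | none => some (s.1, s.1, s.2, s.2)
          | some (lox, hix, loy, hiy) => some (min lox s.1, max hix s.1, min loy s.2, max hiy s.2)) none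
      match box with
      | none => acc
      | some (lox, hix, loy, hiy) => acc ++ [(hix - lox) + (hiy - loy)]) := by
  rw [pvA_inner, pvB_inner]
  cases hp : net.2.filterMap (pvPt placements) with
  | nil => simp
  | cons s t =>
    simp only [List.foldl_cons, pvStep, List.map_cons]
    rw [pvStep_foldl_some]
    simp [PySem.List.max?_id_cons, PySem.List.min?_id_cons]

-- ===== VERDICT (by name: the statement is the Claim_ definition above) =====
theorem calculate_hpwl_spec : Claim_equal_calculate_hpwl := by
  intro nets placements _ _
  unfold Spec_calculate_hpwl calculate_hpwl calculate_hpwl_alt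
  apply PySem.List.foldl_congr_mem
  intro acc net _
  exact pv_step_eq placements net acc
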